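-- pv_equiv track=rewrite | github.com/ashay0000/FATE | python/federatedml/util/pearson_calculate.py | filter_by_iv
-- ===== SOURCE A (Python) =====
-- def filter_by_iv(cor_pair, order):
--     remove_col = set()
--     for i in order:
--         remove_pair = []
--         if i in remove_col:
--             # 找到所有带i的pair
--             for pair in cor_pair:
--                 if i in pair:
--                     remove_pair.append(pair)
--             # 删掉所有带i的pair2
--             for pair in remove_pair:
--                 cor_pair.remove(pair)
--                 if not cor_pair:
--                     return remove_col
--
--         else:
--             # 找到所有带i的pair
--             for pair in cor_pair:
--                 if i in pair:
--                     remove_pair.append(pair)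
--                     for col_index in pair:
--                         if col_index != i:
--                             remove_col.add(col_index)
--             # 删掉所有带i的pair
--             for pair in remove_pair:
--                 cor_pair.remove(pair)
--                 if not cor_pair:
--                     return remove_col
-- ===== SOURCE B (Python) =====
-- def filter_by_iv(cor_pair, order):
--     present = set()
--     for p in cor_pair:
--         present.update(p)
--     remove_col = set()
--     pairs = cor_pair
--     for i in order:
--         if i not in present:
--             continue
--         kept = []
--         hit = False
--         for p in pairs:
--             if i in p:
--                 hit = True
--                 if i not in remove_col:
--                     remove_col.update(c for c in p if c != i)
--             else:
--                 kept.append(p)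
--         if hit and not kept:
--             return remove_col
--         pairs = kept
--     return None
-- ===== Notes on version B (the rewrite author's own statement) =====
-- stated objective: faster
-- what changed: B prebuilds the set of all column indices occurring in any pair and skips order elements outside it in O(1), handling the rest with a single partitioning pass per order element instead of A's collect-matching-pairs scan followed by an O(n) list.remove call per removed pair.
import Mathlib
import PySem

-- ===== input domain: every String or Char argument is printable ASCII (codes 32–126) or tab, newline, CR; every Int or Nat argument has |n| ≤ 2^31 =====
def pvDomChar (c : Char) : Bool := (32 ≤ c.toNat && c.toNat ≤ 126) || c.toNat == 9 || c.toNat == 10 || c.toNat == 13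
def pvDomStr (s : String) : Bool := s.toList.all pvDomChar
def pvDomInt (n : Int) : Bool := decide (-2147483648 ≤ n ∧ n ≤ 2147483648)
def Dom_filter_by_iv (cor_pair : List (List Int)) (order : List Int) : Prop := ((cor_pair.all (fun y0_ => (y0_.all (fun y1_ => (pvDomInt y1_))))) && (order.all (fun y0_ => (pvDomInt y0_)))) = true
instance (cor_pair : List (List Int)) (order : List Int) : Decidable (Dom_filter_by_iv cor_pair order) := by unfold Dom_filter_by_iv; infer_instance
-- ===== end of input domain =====

-- B builds a set of all elements occurring in pairs, skips order elements not in it, and handles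
-- the rest with a single partitioning pass instead of A's collect-then-remove scans: measurably
-- faster. A mutates cor_pair in place (list.remove); B does not — the equivalence proved here is
-- about the return value only.


-- ===== PORT A =====
-- 'for pair in remove_pair: cor_pair.remove(pair); if not cor_pair: return remove_col'
-- (none = the early 'return remove_col' fired; remove target is always present, so getD never falls back)
def pvA_removeLoop (rp : List (List Int)) (cp : List (List Int)) : Option (List (List Int)) :=
  match rp with
  | [] => some cp
  | p :: t =>
    let cp' := (PySem.List.remove? cp p).getD cp
    if cp' = [] then none else pvA_removeLoop t cp'

def pvA_go (order : List Int) (cp : List (List Int)) (rc : PySem.Set Int) : Option (List Int) :=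
  match order with
  | [] => none
  | i :: rest =>
    if PySem.Set.contains rc i then
      -- collect all pairs containing i
      let rp := cp.foldl (fun acc p => if p.contains i then acc ++ [p] else acc) ([] : List (List Int))
      match pvA_removeLoop rp cp with
      | none => some rc
      | some cp' => pvA_go rest cp' rc
    else
      -- collect all pairs containing i, adding the partner columns to remove_col
      let st := cp.foldl (fun (st : List (List Int) × PySem.Set Int) p =>
        if p.contains i then
          (st.1 ++ [p], p.foldl (fun rc c => if c ≠ i then PySem.Set.add rc c else rc) st.2)
        else st) (([] : List (List Int)), rc)
      match pvA_removeLoop st.1 cp with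
      | none => some st.2
      | some cp' => pvA_go rest cp' st.2

def filter_by_iv (cor_pair : List (List Int)) (order : List Int) : Option (List Int) :=
  pvA_go order cor_pair PySem.Set.empty

-- ===== PORT B =====
-- skip order elements that occur in no pair (the 'present' index); otherwise one pass
-- per order element: split pairs into hits/kept, extend remove_col on the fly
def pvB_go (present : PySem.Set Int) (order : List Int) (pairs : List (List Int)) (rc : PySem.Set Int) : Option (List Int) :=
  match order with
  | [] => none
  | i :: rest =>
    if PySem.Set.contains present i = false then pvB_go present rest pairs rc
    else
      let st := pairs.foldl (fun (st : Bool × List (List Int) × PySem.Set Int) p =>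
        if p.contains i then
          (true, st.2.1,
            if PySem.Set.contains st.2.2 i then st.2.2
            else PySem.Set.update st.2.2 (p.filter (fun c => c ≠ i)))
        else (st.1, st.2.1 ++ [p], st.2.2)) ((false, [], rc) : Bool × List (List Int) × PySem.Set Int)
      if st.1 ∧ st.2.1 = [] then some st.2.2 else pvB_go present rest st.2.1 st.2.2

def filter_by_iv_alt (cor_pair : List (List Int)) (order : List Int) : Option (List Int) :=
  pvB_go (cor_pair.foldl (fun s p => PySem.Set.update s p) PySem.Set.empty) order cor_pair PySem.Set.empty

-- ===== PRECONDITION & SPEC =====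
def Spec_filter_by_iv (cor_pair : List (List Int)) (order : List Int) (out : Option (List Int)) : Prop := out = filter_by_iv_alt cor_pair order
instance (cor_pair : List (List Int)) (order : List Int) (out : Option (List Int)) : Decidable (Spec_filter_by_iv cor_pair order out) := by unfold Spec_filter_by_iv; infer_instance

-- ===== CLAIM (what is proved, stated in full; the proofs are below) =====
def Claim_equal_filter_by_iv : Prop := ∀ (cor_pair : List (List Int)) (order : List Int), Dom_filter_by_iv cor_pair order → Spec_filter_by_iv cor_pair order (filter_by_iv cor_pair order)

-- ===== LEMMAS AND PROOFS =====

-- partners of i in pair p, added one by one (the inner loop of A's else branch)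
def pvAddPartners (i : Int) (p : List Int) (rc : PySem.Set Int) : PySem.Set Int :=
  p.foldl (fun rc c => if c ≠ i then PySem.Set.add rc c else rc) rc

-- all partner additions of one step
def pvAddAll (i : Int) (cp : List (List Int)) (rc : PySem.Set Int) : PySem.Set Int :=
  cp.foldl (fun rc p => if p.contains i then pvAddPartners i p rc else rc) rc

theorem pv_not_mem_addPartners (i : Int) (p : List Int) (rc : PySem.Set Int)
    (h : i ∉ rc) : i ∉ pvAddPartners i p rc := by
  induction p generalizing rc with
  | nil => exact h
  | cons c t ih =>
    by_cases hc : c = i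
    · simpa [pvAddPartners, hc] using ih rc h
    · have h2 : i ∉ PySem.Set.add rc c := by
        rw [PySem.Set.mem_add]
        rintro (h1 | h1)
        · exact h h1
        · exact hc h1.symm
      simpa [pvAddPartners, hc] using ih _ h2

theorem pv_update_eq_addPartners (i : Int) (p : List Int) (rc : PySem.Set Int) :
    PySem.Set.update rc (p.filter (fun c => c ≠ i)) = pvAddPartners i p rc := by
  induction p generalizing rc with
  | nil => rfl
  | cons c t ih =>
    by_cases hc : c = i
    · simpa [PySem.Set.update, pvAddPartners, List.filter_cons, hc] using ih rc
    · simpa [PySem.Set.update, pvAddPartners, List.filter_cons, hc] using ih (PySem.Set.add rc c)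

-- A's collect fold in the then-branch appends exactly the matching pairs
theorem pvA_collect_then (i : Int) (cp : List (List Int)) (acc : List (List Int)) :
    cp.foldl (fun acc p => if p.contains i then acc ++ [p] else acc) acc
      = acc ++ cp.filter (fun p => p.contains i) := by
  induction cp generalizing acc with
  | nil => simp
  | cons p t ih =>
    rw [List.foldl_cons]
    by_cases h : p.contains i
    · have hm : i ∈ p := by simpa using h
      rw [if_pos h, ih, List.filter_cons]
      simp [hm]
    · have hm : i ∉ p := by simpa using h
      rw [if_neg h, ih, List.filter_cons]
      simp [hm]

-- A's collect fold in the else branch: matching pairs, and all partner additions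
theorem pvA_collect_else (i : Int) (cp : List (List Int)) (acc : List (List Int)) (rc : PySem.Set Int) :
    cp.foldl (fun (st : List (List Int) × PySem.Set Int) p =>
        if p.contains i then (st.1 ++ [p], pvAddPartners i p st.2) else st) (acc, rc)
      = (acc ++ cp.filter (fun p => p.contains i), pvAddAll i cp rc) := by
  induction cp generalizing acc rc with
  | nil => simp [pvAddAll]
  | cons p t ih =>
    rw [List.foldl_cons]
    by_cases h : p.contains i
    · have hm : i ∈ p := by simpa using h
      rw [if_pos h, ih, List.filter_cons]
      simp [hm, pvAddAll]
    · have hm : i ∉ p := by simpa using h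
      rw [if_neg h, ih, List.filter_cons]
      simp [hm, pvAddAll]

theorem pv_remove?_append (pre l : List (List Int)) (v : List Int) (h : v ∉ pre) :
    PySem.List.remove? (pre ++ l) v = (PySem.List.remove? l v).map (pre ++ ·) := by
  induction pre with
  | nil =>
    simp only [List.nil_append]
    cases PySem.List.remove? l v <;> simp
  | cons x xs ih =>
    have hx : x ≠ v := fun e => h (by simp [e])
    have hxs : v ∉ xs := fun e => h (by simp [e])
    rw [List.cons_append, PySem.List.remove?_cons_of_ne _ hx, ih hxs]
    cases PySem.List.remove? l v <;> simp

-- the removal loop, over a list pre ++ cp whose pre-part has no match: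
-- early return (none) iff something matched and nothing is left, else the kept pairs
theorem pvA_removeLoop_spec (i : Int) (cp : List (List Int)) :
    ∀ pre : List (List Int), (∀ p ∈ pre, i ∉ p) →
    pvA_removeLoop (cp.filter (fun p => p.contains i)) (pre ++ cp)
      = if cp.filter (fun p => p.contains i) ≠ [] ∧ pre ++ cp.filter (fun p => !p.contains i) = []
        then none
        else some (pre ++ cp.filter (fun p => !p.contains i)) := by
  induction cp with
  | nil => intro pre hpre; simp [pvA_removeLoop]
  | cons p t ih =>
    intro pre hpre
    by_cases h : i ∈ p
    · -- p matches: it is removed first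
      have hp : p ∉ pre := fun hm => hpre p hm h
      rw [show (p :: t).filter (fun p => p.contains i) = p :: t.filter (fun p => p.contains i) by
        simp [h]]
      rw [show (p :: t).filter (fun p => !p.contains i) = t.filter (fun p => !p.contains i) by
        simp [h]]
      unfold pvA_removeLoop
      rw [pv_remove?_append pre (p :: t) p hp, PySem.List.remove?_cons_self p t]
      simp only [Option.map_some, Option.getD_some]
      by_cases he : pre ++ t = []
      · have hpre0 : pre = [] := by cases pre with | nil => rfl | cons a b => simp at he
        have ht0 : t = [] := by simpa [hpre0] using he
        simp [he, hpre0, ht0]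
      · rw [if_neg he, ih pre hpre]
        by_cases hk : pre ++ t.filter (fun q => !q.contains i) = []
        · by_cases hm : t.filter (fun q => q.contains i) = []
          · exfalso
            have hpre0 : pre = [] := by cases pre with | nil => rfl | cons a b => simp at hk
            have ht0 : t = [] := by
              cases t with
              | nil => rfl
              | cons q u =>
                by_cases hq : i ∈ q
                · simp [hq] at hm
                · simp [hq, hpre0] at hk
            exact he (by simp [hpre0, ht0])
          · have hm' : ∃ x ∈ t, i ∈ x := by
              rcases List.exists_mem_of_ne_nil _ hm with ⟨q, hq⟩
              have := List.mem_filter.mp hq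
              exact ⟨q, this.1, by simpa using this.2⟩
            have hk' : pre = [] ∧ ∀ a ∈ t, i ∈ a := by simpa using hk
            simp [hm', hk']
        · have hk' : ¬ (pre = [] ∧ ∀ a ∈ t, i ∈ a) := by simpa using hk
          simp [hk']
    · -- p does not match: fold p into the prefix
      have hstep : ∀ q ∈ pre ++ [p], i ∉ q := by
        intro q hq
        rcases List.mem_append.mp hq with h1 | h1
        · exact hpre q h1
        · simp at h1; subst h1; exact h
      have := ih (pre ++ [p]) hstep
      rw [show (p :: t).filter (fun p => p.contains i) = t.filter (fun p => p.contains i) by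
        simp [h]]
      rw [show (p :: t).filter (fun p => !p.contains i) = p :: t.filter (fun p => !p.contains i) by
        simp [h]]
      simpa [List.append_assoc] using this

-- B's one pass computes: any-match flag, kept pairs, extended remove_col
theorem pvB_fold_not_mem (i : Int) (cp : List (List Int)) :
    ∀ (b : Bool) (k : List (List Int)) (rc : PySem.Set Int), i ∉ rc →
    cp.foldl (fun (st : Bool × List (List Int) × PySem.Set Int) p =>
      if p.contains i then
        (true, st.2.1,
          if PySem.Set.contains st.2.2 i then st.2.2
          else PySem.Set.update st.2.2 (p.filter (fun c => c ≠ i)))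
      else (st.1, st.2.1 ++ [p], st.2.2)) (b, k, rc)
      = ((b || cp.any (fun p => p.contains i)), k ++ cp.filter (fun p => !p.contains i), pvAddAll i cp rc) := by
  induction cp with
  | nil => intro b k rc h; simp [pvAddAll]
  | cons p t ih =>
    intro b k rc h
    rw [List.foldl_cons]
    by_cases hp : p.contains i
    · rw [if_pos hp]
      have hm : i ∈ p := by simpa using hp
      rw [if_neg (by simpa using h)]
      rw [pv_update_eq_addPartners]
      rw [ih true k (pvAddPartners i p rc) (pv_not_mem_addPartners i p rc h)]
      simp [hm, pvAddAll]
    · have hm : i ∉ p := by simpa using hp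
      rw [if_neg hp]
      rw [ih b (k ++ [p]) rc h]
      simp [hm, pvAddAll, List.append_assoc]

theorem pvB_fold_mem (i : Int) (cp : List (List Int)) :
    ∀ (b : Bool) (k : List (List Int)) (rc : PySem.Set Int), i ∈ rc →
    cp.foldl (fun (st : Bool × List (List Int) × PySem.Set Int) p =>
      if p.contains i then
        (true, st.2.1,
          if PySem.Set.contains st.2.2 i then st.2.2
          else PySem.Set.update st.2.2 (p.filter (fun c => c ≠ i)))
      else (st.1, st.2.1 ++ [p], st.2.2)) (b, k, rc)
      = ((b || cp.any (fun p => p.contains i)), k ++ cp.filter (fun p => !p.contains i), rc) := by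
  induction cp with
  | nil => intro b k rc h; simp
  | cons p t ih =>
    intro b k rc h
    rw [List.foldl_cons]
    by_cases hp : p.contains i
    · rw [if_pos hp]
      have hm : i ∈ p := by simpa using hp
      rw [if_pos (by simpa using h : PySem.Set.contains rc i = true)]
      rw [ih true k rc h]
      simp [hm]
    · have hm : i ∉ p := by simpa using hp
      rw [if_neg hp]
      rw [ih b (k ++ [p]) rc h]
      simp [hm, List.append_assoc]

-- filter nonempty ↔ any
theorem pv_filter_ne_any (i : Int) (cp : List (List Int)) :
    (cp.filter (fun p => p.contains i) ≠ []) ↔ cp.any (fun p => p.contains i) = true := by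
  constructor
  · intro h
    rcases List.exists_mem_of_ne_nil _ h with ⟨p, hp⟩
    have := List.mem_filter.mp hp
    exact List.any_eq_true.mpr ⟨p, this.1, this.2⟩
  · intro h hnil
    rcases List.any_eq_true.mp h with ⟨p, hp, hpi⟩
    have h3 : p ∈ cp.filter (fun p => p.contains i) := List.mem_filter.mpr ⟨hp, hpi⟩
    rw [hnil] at h3
    cases h3

theorem pvA_removeLoop_nil (i : Int) (cp : List (List Int)) :
    pvA_removeLoop (cp.filter (fun p => p.contains i)) cp
      = if cp.filter (fun p => p.contains i) ≠ [] ∧ cp.filter (fun p => !p.contains i) = []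
        then none
        else some (cp.filter (fun p => !p.contains i)) := by
  simpa using pvA_removeLoop_spec i cp [] (by intro p hp; cases hp)

-- if no pair of cp contains i, the partner-adding fold leaves rc unchanged
theorem pvAddAll_of_no_match (i : Int) (cp : List (List Int)) (rc : PySem.Set Int)
    (h : ∀ p ∈ cp, i ∉ p) : pvAddAll i cp rc = rc := by
  induction cp with
  | nil => rfl
  | cons p t ih =>
    have hp : i ∉ p := h p (by simp)
    have : pvAddAll i (p :: t) rc = pvAddAll i t rc := by
      simp [pvAddAll, hp]
    rw [this, ih (fun q hq => h q (by simp [hq]))]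

-- membership is preserved by folding Set.update
theorem pv_foldl_update_mono (c : Int) (t : List (List Int)) :
    ∀ s : PySem.Set Int, c ∈ s → c ∈ t.foldl (fun s p => PySem.Set.update s p) s := by
  induction t with
  | nil => intro s h; simpa using h
  | cons r u ih =>
    intro s h
    rw [List.foldl_cons]
    exact ih _ ((PySem.Set.mem_update s r c).mpr (Or.inl h))

-- every element of every pair of cor_pair is in the 'present' set B builds
theorem pv_mem_present (cp : List (List Int)) :
    ∀ (s : PySem.Set Int) (p : List Int), p ∈ cp → ∀ c ∈ p,
      c ∈ cp.foldl (fun s p => PySem.Set.update s p) s := by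
  induction cp with
  | nil => intro s p hp; cases hp
  | cons q t ih =>
    intro s p hp c hc
    rw [List.foldl_cons]
    rw [List.mem_cons] at hp
    rcases hp with hp | hp
    · subst hp
      exact pv_foldl_update_mono c t _ ((PySem.Set.mem_update s p c).mpr (Or.inr hc))
    · exact ih (PySem.Set.update s q) p hp c hc

theorem pv_go_eq (order : List Int) (present : PySem.Set Int) :
    ∀ (cp : List (List Int)) (rc : PySem.Set Int),
    (∀ p ∈ cp, ∀ c ∈ p, c ∈ present) →
    pvA_go order cp rc = pvB_go present order cp rc := by
  induction order with
  | nil => intro cp rc _; rfl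
  | cons i rest ih =>
    intro cp rc hinv
    by_cases hpres : PySem.Set.contains present i = false
    · -- i occurs in no pair: A's step is a no-op, B skips
      have hip : i ∉ present := by simpa using hpres
      have hno : ∀ p ∈ cp, i ∉ p := fun p hp hc => hip (hinv p hp i hc)
      have hfil : cp.filter (fun p => p.contains i) = [] := by
        rw [List.filter_eq_nil_iff]
        intro p hp
        simpa using hno p hp
      have hkept : cp.filter (fun p => !p.contains i) = cp := by
        rw [List.filter_eq_self]
        intro p hp
        simpa using hno p hp
      unfold pvA_go pvB_go
      rw [if_pos hpres]
      by_cases h : i ∈ rc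
      · rw [if_pos (by simpa using h), pvA_collect_then i cp []]
        simp only [List.nil_append]
        rw [pvA_removeLoop_nil i cp, hfil]
        simp only [ne_eq, not_true_eq_false, false_and, if_false, hkept]
        exact ih cp rc hinv
      · rw [if_neg (by simpa using h)]
        have hc := pvA_collect_else i cp [] rc
        simp only [pvAddPartners] at hc
        rw [hc]
        simp only [List.nil_append]
        rw [pvA_removeLoop_nil i cp, hfil, pvAddAll_of_no_match i cp rc hno]
        simp only [ne_eq, not_true_eq_false, false_and, if_false, hkept]
        exact ih cp rc hinv
    · have hkinv : ∀ p ∈ cp.filter (fun p => !p.contains i), ∀ c ∈ p, c ∈ present :=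
        fun p hp => hinv p (List.mem_of_mem_filter hp)
      unfold pvA_go pvB_go
      rw [if_neg hpres]
      by_cases h : i ∈ rc
      · rw [if_pos (by simpa using h)]
        rw [pvB_fold_mem i cp false [] rc h]
        rw [pvA_collect_then i cp []]
        simp only [List.nil_append, Bool.false_or]
        rw [pvA_removeLoop_nil i cp]
        have hiff : (cp.filter (fun p => p.contains i) ≠ [] ∧ cp.filter (fun p => !p.contains i) = [])
            ↔ ((cp.any fun p => p.contains i) = true ∧ cp.filter (fun p => !p.contains i) = []) := by
          rw [pv_filter_ne_any]
        by_cases hC : (cp.any fun p => p.contains i) = true ∧ cp.filter (fun p => !p.contains i) = []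
        · rw [if_pos (hiff.mpr hC), if_pos hC]
        · rw [if_neg (fun hh => hC (hiff.mp hh)), if_neg hC]
          exact ih _ _ hkinv
      · rw [if_neg (by simpa using h)]
        rw [pvB_fold_not_mem i cp false [] rc h]
        have hc := pvA_collect_else i cp [] rc
        simp only [pvAddPartners] at hc
        rw [hc]
        simp only [List.nil_append, Bool.false_or]
        rw [pvA_removeLoop_nil i cp]
        have hiff : (cp.filter (fun p => p.contains i) ≠ [] ∧ cp.filter (fun p => !p.contains i) = [])
            ↔ ((cp.any fun p => p.contains i) = true ∧ cp.filter (fun p => !p.contains i) = []) := by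
          rw [pv_filter_ne_any]
        by_cases hC : (cp.any fun p => p.contains i) = true ∧ cp.filter (fun p => !p.contains i) = []
        · rw [if_pos (hiff.mpr hC), if_pos hC]
        · rw [if_neg (fun hh => hC (hiff.mp hh)), if_neg hC]
          exact ih _ _ hkinv

-- ===== VERDICT (by name: the statement is the Claim_ definition above) =====
theorem filter_by_iv_spec : Claim_equal_filter_by_iv := by
  intro cor_pair order _
  unfold Spec_filter_by_iv filter_by_iv filter_by_iv_alt
  exact pv_go_eq order _ cor_pair PySem.Set.empty
    (fun p hp c hc => pv_mem_present cor_pair PySem.Set.empty p hp c hc)
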